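-- pv_equiv track=rewrite | github.com/kietvu171003/Final-TDLT | Tinh gio dem nguoc.py | Tinh_Toan
-- ===== SOURCE A (Python) =====
-- Nam={1:31, 2:28, 3:31, 4:30, 5:31, 6:30, 7:31, 8:31, 9:30, 10:31, 11:30, 12:31}
--
-- def Tinh_Toan(Day, Month, Year, Hour, Minute, Second):
--     Dict_Phu=dict(Nam)
--     if Year%4==0 and Year%100!=0:
--         Dict_Phu[2]+=1
--         Tong_Ngay=366
--     elif Year%400==0:
--         Dict_Phu[2]+=1
--         Tong_Ngay=366
--     else:
--         Tong_Ngay=365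
--     Days=Dict_Phu[int(Month)]-int(Day)
--     Hours=24-Hour
--     Minutes=0-Minute
--     Seconds=0-Second
--     Sum=Days*24*60*60+Hours*60*60+Minutes*60+Seconds
--     for i in range(int(Month)+1,13):
--         Sum+=(Dict_Phu[i]*24*60*60)
--     return Sum, Tong_Ngay
-- ===== SOURCE B (Python) =====
-- MDAYS = [31, 28, 31, 30, 31, 30, 31, 31, 30, 31, 30, 31]
--
-- def Tinh_Toan(Day, Month, Year, Hour, Minute, Second):
--     leap = (Year % 4 == 0 and Year % 100 != 0) or Year % 400 == 0
--     Tong_Ngay = 366 if leap else 365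
--     days = list(MDAYS)
--     if leap:
--         days[1] = 29
--     cum_before = sum(days[:int(Month) - 1])
--     D_remaining = Tong_Ngay - cum_before - int(Day)
--     Sum = D_remaining * 86400 + (24 - Hour) * 3600 - Minute * 60 - Second
--     return Sum, Tong_Ngay
-- ===== Notes on version B (the rewrite author's own statement) =====
-- stated objective: alternative
-- what changed: B replaces A's dict copy plus explicit summation loop over the months after the current one by total-days-minus-elapsed: it subtracts the sum of a list prefix (months before the current one) and the day from the year length and multiplies once by 86400.
import Mathlib
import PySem

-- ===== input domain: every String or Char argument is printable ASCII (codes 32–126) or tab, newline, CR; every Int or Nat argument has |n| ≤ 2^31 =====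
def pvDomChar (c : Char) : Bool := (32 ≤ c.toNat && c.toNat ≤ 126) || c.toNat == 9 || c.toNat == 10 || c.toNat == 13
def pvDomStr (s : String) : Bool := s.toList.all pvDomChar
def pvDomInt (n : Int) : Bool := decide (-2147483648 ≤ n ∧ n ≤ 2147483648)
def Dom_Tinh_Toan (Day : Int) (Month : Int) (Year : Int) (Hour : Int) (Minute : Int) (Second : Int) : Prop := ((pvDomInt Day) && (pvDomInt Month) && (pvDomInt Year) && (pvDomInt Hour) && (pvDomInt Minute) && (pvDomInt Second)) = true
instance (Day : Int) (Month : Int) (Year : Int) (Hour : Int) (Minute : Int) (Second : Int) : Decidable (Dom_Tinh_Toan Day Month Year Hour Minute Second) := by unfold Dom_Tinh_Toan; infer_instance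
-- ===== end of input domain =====

-- B replaces A's summation of the months AFTER the current one by total-days-minus-elapsed-days
-- (cumulative prefix subtracted from the year length): a different decomposition, no speed claim.

-- ===== PORT A =====
def pvNam : PySem.Dict Int Int :=
  PySem.Dict.ofList [(1,31),(2,28),(3,31),(4,30),(5,31),(6,30),(7,31),(8,31),(9,30),(10,31),(11,30),(12,31)]

def Tinh_Toan (Day : Int) (Month : Int) (Year : Int) (Hour : Int) (Minute : Int) (Second : Int) : Int × Int :=
  let res : PySem.Dict Int Int × Int :=
    if PySem.Int.mod Year 4 = 0 ∧ PySem.Int.mod Year 100 ≠ 0 then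
      (pvNam.modify 2 0 (· + 1), 366)
    else if PySem.Int.mod Year 400 = 0 then
      (pvNam.modify 2 0 (· + 1), 366)
    else (pvNam, 365)
  let dictPhu := res.1
  let tongNgay := res.2
  -- Dict_Phu[int(Month)]: KeyError (= none) excluded by Pre_Tinh_Toan
  let days := (dictPhu.get? Month).getD 0 - Day
  let hours := 24 - Hour
  let minutes := 0 - Minute
  let seconds := 0 - Second
  let sum0 := days*24*60*60 + hours*60*60 + minutes*60 + seconds
  let sum := (PySem.List.pyRange (Month+1) 13 1).foldl
    (fun s i => s + (dictPhu.get? i).getD 0 * 24 * 60 * 60) sum0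
  (sum, tongNgay)

-- ===== PORT B =====
def pvMDAYS : List Int := [31,28,31,30,31,30,31,31,30,31,30,31]

def Tinh_Toan_alt (Day : Int) (Month : Int) (Year : Int) (Hour : Int) (Minute : Int) (Second : Int) : Int × Int :=
  let leap := (PySem.Int.mod Year 4 = 0 ∧ PySem.Int.mod Year 100 ≠ 0) ∨ PySem.Int.mod Year 400 = 0
  let tongNgay : Int := if leap then 366 else 365
  let days := if leap then pvMDAYS.set 1 29 else pvMDAYS
  let cumBefore := (PySem.List.slice days none (some (Month - 1))).sum
  let dRemaining := tongNgay - cumBefore - Day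
  let sum := dRemaining * 86400 + (24 - Hour) * 3600 - Minute * 60 - Second
  (sum, tongNgay)

-- ===== PRECONDITION & SPEC =====
-- Pre_ excludes Month outside 1..12, where A's Dict_Phu[int(Month)] raises KeyError.
def Pre_Tinh_Toan (Day : Int) (Month : Int) (Year : Int) (Hour : Int) (Minute : Int) (Second : Int) : Prop :=
  1 ≤ Month ∧ Month ≤ 12
instance (Day : Int) (Month : Int) (Year : Int) (Hour : Int) (Minute : Int) (Second : Int) : Decidable (Pre_Tinh_Toan Day Month Year Hour Minute Second) := by unfold Pre_Tinh_Toan; infer_instance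

def pvWitness_Tinh_Toan : Int × Int × Int × Int × Int × Int := (15, 6, 2024, 10, 30, 45)

def Spec_Tinh_Toan (Day : Int) (Month : Int) (Year : Int) (Hour : Int) (Minute : Int) (Second : Int) (out : Int × Int) : Prop := out = Tinh_Toan_alt Day Month Year Hour Minute Second
instance (Day : Int) (Month : Int) (Year : Int) (Hour : Int) (Minute : Int) (Second : Int) (out : Int × Int) : Decidable (Spec_Tinh_Toan Day Month Year Hour Minute Second out) := by unfold Spec_Tinh_Toan; infer_instance

-- ===== CLAIM (what is proved, stated in full; the proofs are below) =====
def Claim_equal_Tinh_Toan : Prop := ∀ (Day : Int) (Month : Int) (Year : Int) (Hour : Int) (Minute : Int) (Second : Int), Dom_Tinh_Toan Day Month Year Hour Minute Second → Pre_Tinh_Toan Day Month Year Hour Minute Second → Spec_Tinh_Toan Day Month Year Hour Minute Second (Tinh_Toan Day Month Year Hour Minute Second)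


-- ===== LEMMAS AND PROOFS =====

-- current month's days plus the later months' seconds-per-day sum equals (year length - elapsed prefix) * 86400
lemma pv_key_leap : ∀ M : Int, 1 ≤ M → M ≤ 12 →
    ((pvNam.modify 2 0 (· + 1)).get? M).getD 0 * 24 * 60 * 60 +
      ((PySem.List.pyRange (M+1) 13 1).map
        (fun i => ((pvNam.modify 2 0 (· + 1)).get? i).getD 0 * 24 * 60 * 60)).sum
    = (366 - (PySem.List.slice (pvMDAYS.set 1 29) none (some (M-1))).sum) * 86400 := by
  intro M h1 h2
  interval_cases M <;> decide

lemma pv_key_reg : ∀ M : Int, 1 ≤ M → M ≤ 12 →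
    (pvNam.get? M).getD 0 * 24 * 60 * 60 +
      ((PySem.List.pyRange (M+1) 13 1).map
        (fun i => (pvNam.get? i).getD 0 * 24 * 60 * 60)).sum
    = (365 - (PySem.List.slice pvMDAYS none (some (M-1))).sum) * 86400 := by
  intro M h1 h2
  interval_cases M <;> decide

-- ===== VERDICT (by name: the statement is the Claim_ definition above) =====
theorem Tinh_Toan_spec : Claim_equal_Tinh_Toan := by
  intro Day Month Year Hour Minute Second _ hpre
  unfold Spec_Tinh_Toan Tinh_Toan Tinh_Toan_alt
  obtain ⟨h1, h2⟩ := hpre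
  split_ifs <;>
  simp only [*, ne_eq, not_false_eq_true, and_true, true_or, or_true, or_self,
    ite_true, ite_false, Prod.mk.injEq] <;>
  rw [PySem.List.foldl_add] <;>
  first
    | linear_combination pv_key_leap Month h1 h2
    | linear_combination pv_key_reg Month h1 h2
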